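-- pv_equiv track=rewrite | github.com/MilanMarocchi/noise-robust-cad-conformer | src/python/heartsignals/processing/segments.py | seg_idxs_from_mat
-- ===== SOURCE A (Python) =====
-- def seg_idxs_from_mat(matform):
--     seg_joins = []
--
--     curr_group_end = next_group_start = segment_start = None
--
--     for s in matform:
--
--         state = s[1][0]
--         sample_num = s[0][0][0] - 1
--
--         if state == 'diastole':
--             curr_group_end = sample_num
--         elif state == 'S1':
--             next_group_start = sample_num
--         elif state == '(N':
--             curr_group_end = next_group_start = segment_start = None
--         elif state == 'N)':
--             continue
--
--         if curr_group_end is not None and next_group_start is not None: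
--             segment_end = round((curr_group_end + next_group_start) / 2)
--
--             if segment_start is not None:
--                 seg_joins.append((segment_start, segment_end))
--
--             segment_start, curr_group_end, next_group_start = segment_end, next_group_start, None
--
--     return seg_joins
-- ===== SOURCE B (Python) =====
-- def seg_idxs_from_mat(matform):
--     # Pass 1: emit boundary midpoints, with None as a chain-break sentinel on '(N'.
--     boundaries = []
--     curr_group_end = next_group_start = None
--     for s in matform:
--         state = s[1][0]
--         sample_num = s[0][0][0] - 1
--         if state == 'N)':
--             continue
--         if state == 'diastole':
--             curr_group_end = sample_num
--         elif state == 'S1':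
--             next_group_start = sample_num
--         elif state == '(N':
--             curr_group_end = next_group_start = None
--             boundaries.append(None)
--         if curr_group_end is not None and next_group_start is not None:
--             boundaries.append(round((curr_group_end + next_group_start) / 2))
--             curr_group_end, next_group_start = next_group_start, None
--     # Pass 2: split on sentinels and pair consecutive boundaries within each run.
--     out = []
--     run = []
--     for b in boundaries + [None]:
--         if b is None:
--             out.extend(zip(run, run[1:]))
--             run = []
--         else:
--             run.append(b)
--     return out
-- ===== Notes on version B (the rewrite author's own statement) =====
-- stated objective: alternative
-- what changed: A pairs segment boundaries inline inside its state machine; B separates concerns into two passes: first emit the midpoint boundaries with a sentinel at each '(N' reset, then split on sentinels and zip each run with its tail to form the consecutive pairs.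
-- outside the precondition, e.g. on seg_idxs_from_mat([(((5,),), ())]): A raises IndexError, B raises IndexError
import Mathlib
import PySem

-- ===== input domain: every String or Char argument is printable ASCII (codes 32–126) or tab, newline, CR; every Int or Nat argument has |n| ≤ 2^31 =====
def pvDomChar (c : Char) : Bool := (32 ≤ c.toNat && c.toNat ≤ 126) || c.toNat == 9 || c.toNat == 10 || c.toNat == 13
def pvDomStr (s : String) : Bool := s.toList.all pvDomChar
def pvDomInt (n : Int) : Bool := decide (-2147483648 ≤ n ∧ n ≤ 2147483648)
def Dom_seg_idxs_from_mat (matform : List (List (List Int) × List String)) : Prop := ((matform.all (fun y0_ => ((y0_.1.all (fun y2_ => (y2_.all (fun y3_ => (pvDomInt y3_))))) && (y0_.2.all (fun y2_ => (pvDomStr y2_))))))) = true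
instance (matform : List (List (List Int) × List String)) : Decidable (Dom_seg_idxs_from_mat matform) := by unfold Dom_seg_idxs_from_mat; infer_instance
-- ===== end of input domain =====

-- B splits A's inline pairing into two passes: first emit chain boundaries (with a
-- sentinel at each '(N' reset), then pair consecutive boundaries within each run (objective: alternative decomposition).

-- ===== PORT A =====
-- round((a+b)/2) in Python: exact half-to-even on a half-integer (exact in float for |a|,|b| ≤ 2^31)
def pyMid (a b : Int) : Int :=
  let s := a + b
  if s % 2 = 0 then PySem.Int.floordiv s 2
  else
    let k := PySem.Int.floordiv s 2
    if k % 2 = 0 then k else k + 1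

-- A's loop, state = (seg_joins, curr_group_end, next_group_start, segment_start); s[1][0]/s[0][0][0]
-- read with headD (Pre_ guarantees the lists are nonempty, where Python would raise IndexError)
def aLoop : List (List (List Int) × List String) → List (Int × Int) →
    Option Int → Option Int → Option Int → List (Int × Int)
  | [], sj, _, _, _ => sj
  | s :: rest, sj, c, n, ss =>
    let state := s.2.headD ""
    let sampleNum := (s.1.headD []).headD 0 - 1
    if state = "N)" then aLoop rest sj c n ss   -- continue: skips the midpoint block
    else
      let c' := if state = "diastole" then some sampleNum
                else if state = "(N" then none else c
      let n' := if state = "S1" then some sampleNum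
                else if state = "(N" then none else n
      let ss' := if state = "(N" then none else ss
      match c', n' with
      | some cv, some nv =>
        let segEnd := pyMid cv nv
        let sj' := match ss' with
          | some sv => sj ++ [(sv, segEnd)]
          | none => sj
        aLoop rest sj' (some nv) none (some segEnd)
      | _, _ => aLoop rest sj c' n' ss'

def seg_idxs_from_mat (matform : List (List (List Int) × List String)) : List (Int × Int) :=
  aLoop matform [] none none none

-- ===== PORT B =====
-- Pass 1: the boundaries list (none = chain-break sentinel), state = (curr_group_end, next_group_start)
def bLoop : List (List (List Int) × List String) → Option Int → Option Int → List (Option Int)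
  | [], _, _ => []
  | s :: rest, c, n =>
    let state := s.2.headD ""
    let sampleNum := (s.1.headD []).headD 0 - 1
    if state = "N)" then bLoop rest c n
    else if state = "(N" then none :: bLoop rest none none
    else
      let c' := if state = "diastole" then some sampleNum else c
      let n' := if state = "S1" then some sampleNum else n
      match c', n' with
      | some cv, some nv => some (pyMid cv nv) :: bLoop rest (some nv) none
      | _, _ => bLoop rest c' n'

-- zip(run, run[1:])
def pairsOf (run : List Int) : List (Int × Int) := run.zip run.tail

-- Pass 2: split boundaries on sentinels, pairing each run
def pairRuns : List (Option Int) → List Int → List (Int × Int) → List (Int × Int)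
  | [], _, out => out
  | none :: rest, run, out => pairRuns rest [] (out ++ pairsOf run)
  | some b :: rest, run, out => pairRuns rest (run ++ [b]) out

def seg_idxs_from_mat_alt (matform : List (List (List Int) × List String)) : List (Int × Int) :=
  pairRuns (bLoop matform none none ++ [none]) [] []

-- ===== PRECONDITION & SPEC =====
-- Pre_ excludes exactly the inputs where Python A raises IndexError: an element whose label
-- list s[1], sample list s[0] or first sample group s[0][0] is empty.
def Pre_seg_idxs_from_mat (matform : List (List (List Int) × List String)) : Prop :=
  ∀ s ∈ matform, s.2 ≠ [] ∧ s.1 ≠ [] ∧ s.1.headD [] ≠ []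
instance (matform : List (List (List Int) × List String)) : Decidable (Pre_seg_idxs_from_mat matform) := by
  unfold Pre_seg_idxs_from_mat; infer_instance

def pvWitness_seg_idxs_from_mat : (List (List (List Int) × List String)) :=
  [([[10]], ["diastole"]), ([[21]], ["S1"]), ([[30]], ["diastole"]), ([[41]], ["S1"]),
   ([[50]], ["(N"]), ([[60]], ["diastole"]), ([[71]], ["S1"]), ([[80]], ["diastole"]), ([[91]], ["S1"])]

def Spec_seg_idxs_from_mat (matform : List (List (List Int) × List String)) (out : List (Int × Int)) : Prop := out = seg_idxs_from_mat_alt matform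
instance (matform : List (List (List Int) × List String)) (out : List (Int × Int)) : Decidable (Spec_seg_idxs_from_mat matform out) := by unfold Spec_seg_idxs_from_mat; infer_instance

-- ===== CLAIM (what is proved, stated in full; the proofs are below) =====
def Claim_equal_seg_idxs_from_mat : Prop := ∀ (matform : List (List (List Int) × List String)), Dom_seg_idxs_from_mat matform → Pre_seg_idxs_from_mat matform → Spec_seg_idxs_from_mat matform (seg_idxs_from_mat matform)

-- ===== LEMMAS AND PROOFS =====

-- appending a boundary to a run adds exactly the pair (last of run, m) — or nothing if the run is empty
lemma pairsOf_snoc (run : List Int) (m : Int) :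
    pairsOf (run ++ [m]) = pairsOf run ++
      (match run.getLast? with | some sv => [(sv, m)] | none => []) := by
  induction run with
  | nil => simp [pairsOf]
  | cons x xs ih =>
    cases xs with
    | nil => simp [pairsOf]
    | cons y ys =>
      simp only [pairsOf, List.cons_append, List.tail_cons, List.zip_cons_cons,
        List.getLast?_cons_cons] at *
      simp [ih]

-- loop invariant: A's state (sj, c, n, ss) corresponds to B's run/out with
-- ss = run.getLast? and sj = out ++ pairsOf run
lemma loop_equiv (l : List (List (List Int) × List String)) :
    ∀ (c n : Option Int) (run : List Int) (out : List (Int × Int)),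
      aLoop l (out ++ pairsOf run) c n run.getLast? =
        pairRuns (bLoop l c n ++ [none]) run out := by
  induction l with
  | nil => intro c n run out; simp [aLoop, bLoop, pairRuns]
  | cons s rest ih =>
    intro c n run out
    simp only [aLoop, bLoop]
    by_cases hN : s.2.headD "" = "N)"
    · simp only [hN, reduceIte]
      exact ih c n run out
    · by_cases hP : s.2.headD "" = "(N"
      · simp only [hP, reduceIte]
        have := ih none none [] (out ++ pairsOf run)
        simpa [pairsOf] using this
      · simp only [hN, hP, reduceIte]
        rcases hc : (if s.2.headD "" = "diastole" then some ((s.1.headD []).headD 0 - 1) else c) with _ | cv <;>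
          rcases hn : (if s.2.headD "" = "S1" then some ((s.1.headD []).headD 0 - 1) else n) with _ | nv
        · exact ih _ _ run out
        · exact ih _ _ run out
        · exact ih _ _ run out
        · simp only [List.cons_append, pairRuns]
          have := ih (some nv) none (run ++ [pyMid cv nv]) out
          rw [pairsOf_snoc] at this
          rcases hr : run.getLast? with _ | sv <;> rw [hr] at this <;>
            simpa [List.append_assoc] using this

-- ===== VERDICT (by name: the statement is the Claim_ definition above) =====
theorem seg_idxs_from_mat_spec : Claim_equal_seg_idxs_from_mat := by
  intro matform _ _
  unfold Spec_seg_idxs_from_mat seg_idxs_from_mat seg_idxs_from_mat_alt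
  have := loop_equiv matform none none [] []
  simpa [pairsOf] using this
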